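-- pv_equiv track=rewrite | github.com/Elann/code_stage | portees_chgt_repere.py | groupe_cinq_points
-- ===== SOURCE A (Python) =====
-- delta_portee = 2
--
-- def test_cinq(a,b,c,d,e):
-- 	if (b-a) < delta_portee+(c-b) and (c-b) < delta_portee+(d-c) and (d-c) < delta_portee+(e-d) and (e-d) < delta_portee+(b-a):
-- 		rep = 1
-- 	else:
-- 		rep = 0
-- 	return rep
--
-- def groupe_cinq_points(l,l2):
-- 	if (len(l) >= 5):
-- 		if test_cinq(l[0],l[1],l[2],l[3],l[4]) == 0:
-- 			groupe_cinq_points(l[1:],l2)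
-- 		else:
-- 			l2.append([l[0],l[1],l[2],l[3],l[4]])
-- 			groupe_cinq_points(l[5:],l2)
-- 	return l2
-- ===== SOURCE B (Python) =====
-- delta_portee = 2
--
-- def groupe_cinq_points(l, l2):
--     # Iterative index scan: no recursion, no slice copies. Mutates l2 in place
--     # (appends matched windows) exactly like A, and returns it.
--     n = len(l)
--     i = 0
--     while i + 5 <= n:
--         a, b, c, d, e = l[i], l[i+1], l[i+2], l[i+3], l[i+4]
--         if (b-a) < delta_portee+(c-b) and (c-b) < delta_portee+(d-c) \
--            and (d-c) < delta_portee+(e-d) and (e-d) < delta_portee+(b-a):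
--             l2.append([a, b, c, d, e])
--             i += 5
--         else:
--             i += 1
--     return l2
-- ===== Notes on version B (the rewrite author's own statement) =====
-- stated objective: faster
-- what changed: Replaced A's recursion on list slices (each step copies the suffix l[1:] or l[5:]) by a single iterative index scan over the original list, with the window test inlined.
import Mathlib
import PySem

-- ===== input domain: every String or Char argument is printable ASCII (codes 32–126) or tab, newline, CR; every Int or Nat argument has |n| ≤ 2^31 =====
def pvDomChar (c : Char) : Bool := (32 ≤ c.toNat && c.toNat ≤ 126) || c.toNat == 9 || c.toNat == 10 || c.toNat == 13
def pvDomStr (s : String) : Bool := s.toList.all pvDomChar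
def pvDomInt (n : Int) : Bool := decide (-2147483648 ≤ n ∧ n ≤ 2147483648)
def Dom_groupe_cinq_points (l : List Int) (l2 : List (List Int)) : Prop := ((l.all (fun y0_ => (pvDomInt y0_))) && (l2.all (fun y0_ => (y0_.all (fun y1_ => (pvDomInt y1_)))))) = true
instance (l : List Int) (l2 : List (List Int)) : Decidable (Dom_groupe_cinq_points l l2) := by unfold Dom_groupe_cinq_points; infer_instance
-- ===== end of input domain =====

-- B replaces A's recursion on list slices by a single iterative index scan (O(n) vs O(n^2)).
-- Both Pythons mutate l2 in place (appending matched windows) identically; the equivalence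
-- proved here is about the returned value.

-- ===== PORT A =====
def test_cinq (a b c d e : Int) : Int :=
  if b - a < 2 + (c - b) ∧ c - b < 2 + (d - c) ∧ d - c < 2 + (e - d) ∧ e - d < 2 + (b - a)
  then 1 else 0

def groupe_cinq_points : List Int → List (List Int) → List (List Int)
  | a :: b :: c :: d :: e :: rest, l2 =>
      if test_cinq a b c d e = 0 then
        groupe_cinq_points (b :: c :: d :: e :: rest) l2
      else
        groupe_cinq_points rest (l2 ++ [[a, b, c, d, e]])
  | _, l2 => l2

-- ===== PORT B =====
-- the while loop of Source B: i scans the fixed list l, n = l.length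
def altGo (l : List Int) (n : Nat) (l2 : List (List Int)) (i : Nat) : List (List Int) :=
  if i + 5 ≤ n then
    let a := l.getD i 0
    let b := l.getD (i+1) 0
    let c := l.getD (i+2) 0
    let d := l.getD (i+3) 0
    let e := l.getD (i+4) 0
    if b - a < 2 + (c - b) ∧ c - b < 2 + (d - c) ∧ d - c < 2 + (e - d) ∧ e - d < 2 + (b - a)
    then altGo l n (l2 ++ [[a, b, c, d, e]]) (i + 5)
    else altGo l n l2 (i + 1)
  else l2
termination_by n - i

def groupe_cinq_points_alt (l : List Int) (l2 : List (List Int)) : List (List Int) :=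
  altGo l l.length l2 0

-- ===== PRECONDITION & SPEC =====
def Spec_groupe_cinq_points (l : List Int) (l2 : List (List Int)) (out : List (List Int)) : Prop := out = groupe_cinq_points_alt l l2
instance (l : List Int) (l2 : List (List Int)) (out : List (List Int)) : Decidable (Spec_groupe_cinq_points l l2 out) := by unfold Spec_groupe_cinq_points; infer_instance

-- ===== CLAIM (what is proved, stated in full; the proofs are below) =====
def Claim_equal_groupe_cinq_points : Prop := ∀ (l : List Int) (l2 : List (List Int)), Dom_groupe_cinq_points l l2 → Spec_groupe_cinq_points l l2 (groupe_cinq_points l l2)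

-- ===== LEMMAS AND PROOFS =====

-- ===== VERDICT (by name: the statement is the Claim_ definition above) =====
lemma getD_drop (l : List Int) (i j : Nat) :
    l.getD (i + j) 0 = (l.drop i).getD j 0 := by
  simp [List.getD, List.getElem?_drop]

lemma altGo_eq_drop (k : Nat) : ∀ (l : List Int) (i : Nat) (l2 : List (List Int)),
    l.length - i ≤ k → altGo l l.length l2 i = groupe_cinq_points (l.drop i) l2 := by
  induction k with
  | zero =>
    intro l i l2 hk
    rw [altGo]
    have h5 : ¬ (i + 5 ≤ l.length) := by omega
    have hd : (l.drop i).length = 0 := by simp; omega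
    rw [List.length_eq_zero_iff] at hd
    simp [h5, hd, groupe_cinq_points]
  | succ k ih =>
    intro l i l2 hk
    rw [altGo]
    by_cases h5 : i + 5 ≤ l.length
    · have hlen : 5 ≤ (l.drop i).length := by simp; omega
      obtain ⟨a, b, c, d, e, rest, hdrop⟩ :
          ∃ a b c d e rest, l.drop i = a :: b :: c :: d :: e :: rest := by
        match hd : l.drop i with
        | [] | [_] | [_,_] | [_,_,_] | [_,_,_,_] => rw [hd] at hlen; simp at hlen
        | a :: b :: c :: d :: e :: rest => exact ⟨a,b,c,d,e,rest, rfl⟩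
      have ga : l.getD i 0 = a := by
        have := getD_drop l i 0; rw [hdrop] at this; simpa using this
      have gb : l.getD (i+1) 0 = b := by
        have := getD_drop l i 1; rw [hdrop] at this; simpa using this
      have gc : l.getD (i+2) 0 = c := by
        have := getD_drop l i 2; rw [hdrop] at this; simpa using this
      have gd : l.getD (i+3) 0 = d := by
        have := getD_drop l i 3; rw [hdrop] at this; simpa using this
      have ge : l.getD (i+4) 0 = e := by
        have := getD_drop l i 4; rw [hdrop] at this; simpa using this
      have hd1 : l.drop (i+1) = b :: c :: d :: e :: rest := by
        have : l.drop (i+1) = (l.drop i).drop 1 := by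
          rw [List.drop_drop]
        rw [this, hdrop]; rfl
      have hd5 : l.drop (i+5) = rest := by
        have : l.drop (i+5) = (l.drop i).drop 5 := by
          rw [List.drop_drop]
        rw [this, hdrop]; rfl
      simp only [h5, if_true, ga, gb, gc, gd, ge]
      by_cases hc : b - a < 2 + (c - b) ∧ c - b < 2 + (d - c) ∧ d - c < 2 + (e - d) ∧ e - d < 2 + (b - a)
      · rw [if_pos hc, ih l (i+5) (l2 ++ [[a,b,c,d,e]]) (by omega), hd5,
            hdrop, groupe_cinq_points, if_neg (by simp [test_cinq, hc])]
      · rw [if_neg hc, ih l (i+1) l2 (by omega), hd1,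
            hdrop, groupe_cinq_points, if_pos (by simp [test_cinq, hc])]
    · have hd : (l.drop i).length < 5 := by simp; omega
      have : ∀ m : List Int, m.length < 5 → groupe_cinq_points m l2 = l2 := by
        intro m hm
        match m with
        | [] | [_] | [_,_] | [_,_,_] | [_,_,_,_] => rfl
        | _ :: _ :: _ :: _ :: _ :: _ => simp at hm; omega
      simp [h5, this _ hd]

theorem groupe_cinq_points_spec : Claim_equal_groupe_cinq_points := by
  intro l l2 _
  unfold Spec_groupe_cinq_points groupe_cinq_points_alt
  rw [altGo_eq_drop l.length l 0 l2 (by omega)]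
  simp
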